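-- pv_equiv track=rewrite | github.com/pre6/MASTERMIND | MASTERMIND_INFO.py | Clues
-- ===== SOURCE A (Python) =====
-- def Clues(code,guess):
--     circle = ''
--     check_mark = ''
--     i = 0
--     while i in range(4):
--         if code[i] == guess[i]:
--             check_mark = check_mark + '● '
--             code = code.replace(code[i], ' ',1)
--             guess = guess.replace(guess[i], ' ',1)
--         i += 1
--     for number in code:
--         if number ==' ':
--             continue
--         elif number in guess:
--             circle = circle + 'o '
--             code = code.replace(number, ' ',1)
--             guess = guess.replace(number, ' ',1)
--
--
--     clue = circle + check_mark
--     return clue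
-- ===== SOURCE B (Python) =====
-- def Clues(code, guess):
--     exact = sum(code[i] == guess[i] for i in range(4))
--     common = sum(min(code.count(c), guess.count(c)) for c in set(code))
--     return 'o ' * (common - exact) + '\u25cf ' * exact
-- ===== Notes on version B (the rewrite author's own statement) =====
-- stated objective: simpler
-- what changed: B replaces A's two string-mutation passes (blanking matched characters with ' ' via str.replace) by direct multiset counting: exact = positional matches over range(4), common = sum of per-character min counts, color = common - exact.
-- outside the precondition, e.g. on Clues('a b4', 'ba 4'): A returns 'o o ● ', B returns 'o o o ● '; on Clues('1 23', '45 6'): A returns '', B returns 'o '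
import Mathlib
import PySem

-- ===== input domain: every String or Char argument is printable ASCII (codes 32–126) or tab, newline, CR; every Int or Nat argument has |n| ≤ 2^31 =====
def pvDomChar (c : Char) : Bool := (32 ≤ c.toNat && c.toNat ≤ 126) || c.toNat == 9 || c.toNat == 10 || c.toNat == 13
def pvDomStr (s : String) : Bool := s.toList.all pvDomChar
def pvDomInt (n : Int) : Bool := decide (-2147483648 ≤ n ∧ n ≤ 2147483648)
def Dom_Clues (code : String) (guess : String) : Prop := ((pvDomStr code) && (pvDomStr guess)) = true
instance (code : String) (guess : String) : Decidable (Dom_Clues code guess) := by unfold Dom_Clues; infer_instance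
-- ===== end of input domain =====

-- B replaces A's two string-mutation passes (blanking matched characters with ' ') by direct
-- multiset counting (exact positional matches + per-character min counts); objective: simpler.

-- ===== PORT A =====
-- exact port of Python's s.replace(old, new, 1): replace the first occurrence of old
def pyReplace1 (s : List Char) (old : Char) (new : Char) : List Char :=
  match s with
  | [] => []
  | x :: xs => if x = old then new :: xs else x :: pyReplace1 xs old new

-- 'i = 0; while i in range(4): ...' — none = IndexError on code[i]/guess[i]
def cluesWhile (i : Nat) (code : List Char) (guess : List Char) (check : List Char) :
    Option (List Char × List Char × List Char) :=
  if i < 4 then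
    match PySem.List.pyGet? code (i : Int), PySem.List.pyGet? guess (i : Int) with
    | some c, some g =>
        if c = g then
          cluesWhile (i + 1) (pyReplace1 code c ' ') (pyReplace1 guess g ' ') (check ++ ['●', ' '])
        else
          cluesWhile (i + 1) code guess check
    | _, _ => none
  else
    some (code, guess, check)
  termination_by 4 - i

-- 'for number in code:' — Python iterates the string object captured at loop entry (snapshot);
-- the reassignments of code/guess inside the loop are still performed, as in A
def cluesFor (snapshot : List Char) (circle : List Char) (code : List Char) (guess : List Char) :
    List Char × List Char × List Char :=
  match snapshot with
  | [] => (circle, code, guess)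
  | n :: rest =>
      if n = ' ' then
        cluesFor rest circle code guess
      else if n ∈ guess then
        cluesFor rest (circle ++ ['o', ' ']) (pyReplace1 code n ' ') (pyReplace1 guess n ' ')
      else
        cluesFor rest circle code guess

def Clues (code : String) (guess : String) : String :=
  match cluesWhile 0 code.toList guess.toList [] with
  | none => ""  -- unreachable under Pre_Clues: Python raises IndexError here
  | some (code1, guess1, check) =>
      let r := cluesFor code1 [] code1 guess1
      String.mk (r.1 ++ check)

-- ===== PORT B =====
def Clues_alt (code : String) (guess : String) : String :=
  let lc := code.toList
  let lg := guess.toList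
  -- exact = sum(code[i] == guess[i] for i in range(4))  (isSome-guard totalizes the IndexError case)
  let exact := (PySem.List.pyRange 0 4 1).countP (fun i =>
    (PySem.List.pyGet? lc i).isSome &&
      PySem.List.pyGet? lc i == PySem.List.pyGet? lg i)
  -- common = sum(min(code.count(c), guess.count(c)) for c in set(code))
  let common := ((PySem.Set.ofList lc).map (fun c => min (lc.count c) (lg.count c))).sum
  String.mk ((List.replicate (common - exact) ['o', ' ']).flatten ++
    (List.replicate exact ['●', ' ']).flatten)

-- ===== PRECONDITION & SPEC =====
-- Pre_ excludes strings shorter than 4 (A raises IndexError) and — outside Mastermind's natural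
-- digit-string domain — inputs whose literal spaces are not exhausted by positional space-space
-- matches in the first four places; there A's output is an artefact of A using ' ' as its
-- blanking sentinel (its colour pass skips input spaces).
def Pre_Clues (code : String) (guess : String) : Prop :=
  4 ≤ code.toList.length ∧ 4 ≤ guess.toList.length ∧
    (List.range 4).countP
        (fun i => decide (code.toList[i]? = some ' ' ∧ guess.toList[i]? = some ' '))
      = min (code.toList.count ' ') (guess.toList.count ' ')
instance (code : String) (guess : String) : Decidable (Pre_Clues code guess) := by
  unfold Pre_Clues; infer_instance
def pvWitness_Clues : String × String := ("1234", "1243")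

def Spec_Clues (code : String) (guess : String) (out : String) : Prop := out = Clues_alt code guess
instance (code : String) (guess : String) (out : String) : Decidable (Spec_Clues code guess out) := by
  unfold Spec_Clues; infer_instance

-- ===== CLAIM (what is proved, stated in full; the proofs are below) =====
def Claim_equal_Clues : Prop := ∀ (code : String) (guess : String), Dom_Clues code guess →
  Pre_Clues code guess → Spec_Clues code guess (Clues code guess)

-- ===== LEMMAS AND PROOFS =====

def pvNonSp (x : Char) : Bool := decide (x ≠ ' ')

theorem pvNonSp_iff (x : Char) : pvNonSp x = true ↔ x ≠ ' ' := by simp [pvNonSp]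

-- the list of matched characters for positions j ∈ [i, 4)
def mcList (lc lg : List Char) (i : Nat) : List Char :=
  (List.range' i (4 - i)).filterMap (fun j => if lc[j]? = lg[j]? then lc[j]? else none)

theorem length_pyReplace1 (s : List Char) (c n : Char) :
    (pyReplace1 s c n).length = s.length := by
  induction s with
  | nil => rfl
  | cons x xs ih => simp only [pyReplace1]; split <;> simp [ih]

theorem pyReplace1_getElem?_high (s : List Char) (c n : Char) :
    ∀ i j : Nat, s[i]? = some c → i < j → (pyReplace1 s c n)[j]? = s[j]? := by
  induction s with
  | nil => intro i j h _; simp at h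
  | cons x xs ih =>
      intro i j h hij
      by_cases hx : x = c
      · subst hx
        simp only [pyReplace1, if_pos rfl]
        obtain ⟨j', rfl⟩ : ∃ j', j = j' + 1 := ⟨j - 1, by omega⟩
        simp
      · simp only [pyReplace1, if_neg hx]
        obtain ⟨i', rfl⟩ : ∃ i', i = i' + 1 := by
          cases i with
          | zero => simp at h; first
                  | exact (hx h).elim
                  | exact (hx h.symm).elim
          | succ i' => exact ⟨i', rfl⟩
        obtain ⟨j', rfl⟩ : ∃ j', j = j' + 1 := ⟨j - 1, by omega⟩
        simp only [List.getElem?_cons_succ] at h ⊢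
        exact ih i' j' h (by omega)

theorem count_pyReplace1 (s : List Char) (c d : Char) (hc : c ∈ s) (hd : d ≠ ' ') :
    (pyReplace1 s c ' ').count d + (if d = c then 1 else 0) = s.count d := by
  induction s with
  | nil => simp at hc
  | cons x xs ih =>
      by_cases hx : x = c
      · subst hx
        simp only [pyReplace1, if_pos rfl, if_true, List.count_cons]
        have h1 : ((' ' : Char) == d) = false := by
          simp only [beq_eq_false_iff_ne, ne_eq]
          exact fun hh => hd hh.symm
        rw [h1]
        by_cases hdx : d = x
        · subst hdx; simp
        · have h2 : (x == d) = false := by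
            simp only [beq_eq_false_iff_ne, ne_eq]
            exact fun hh => hdx hh.symm
          rw [h2]
          simp [hdx]
      · have hc' : c ∈ xs := by
          rcases List.mem_cons.mp hc with h | h
          · first
            | exact (hx h).elim
            | exact (hx h.symm).elim
          · exact h
        simp only [pyReplace1, if_neg hx, List.count_cons]
        have h3 := ih hc'
        split_ifs at h3 ⊢ <;> omega

theorem filter_pyReplace1 (s : List Char) (c : Char) (hc : c ∈ s) (hcs : c ≠ ' ') :
    (pyReplace1 s c ' ').filter pvNonSp =
      (s.filter pvNonSp).erase c := by
  induction s with
  | nil => simp at hc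
  | cons x xs ih =>
      by_cases hx : x = c
      · subst hx
        simp only [pyReplace1, if_pos rfl, if_true, List.filter_cons]
        have h1 : pvNonSp ' ' = false := by simp [pvNonSp]
        have h2 : pvNonSp x = true := by simp [pvNonSp, hcs]
        rw [h1, h2]
        simp only [Bool.false_eq_true, if_false, if_true]
        rw [List.erase_cons_head]
      · have hc' : c ∈ xs := by
          rcases List.mem_cons.mp hc with h | h
          · first
            | exact (hx h).elim
            | exact (hx h.symm).elim
          · exact h
        simp only [pyReplace1, if_neg hx, List.filter_cons]
        by_cases hxs : x = ' '
        · subst hxs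
          have h1 : pvNonSp ' ' = false := by simp [pvNonSp]
          simp only [h1, Bool.false_eq_true, if_false]
          exact ih hc'
        · have h2 : pvNonSp x = true := by simp [pvNonSp, hxs]
          simp only [h2, if_true]
          rw [List.erase_cons_tail (by simpa using hx), ih hc']

theorem mcList_four (lc lg : List Char) : mcList lc lg 4 = [] := by
  simp [mcList]

theorem mcList_step (lc lg : List Char) (i : Nat) (h : i < 4) :
    mcList lc lg i =
      (if lc[i]? = lg[i]? then lc[i]? else none).toList ++ mcList lc lg (i + 1) := by
  unfold mcList
  have h4 : 4 - i = (4 - (i + 1)) + 1 := by omega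
  rw [h4, List.range'_succ, List.filterMap_cons]
  cases h' : (if lc[i]? = lg[i]? then lc[i]? else none) with
  | none => simp [h']
  | some b => simp [h']

theorem cluesWhile_spec (lc lg : List Char) (h4c : 4 ≤ lc.length) (h4g : 4 ≤ lg.length) :
    ∀ k i, i + k = 4 → ∀ cc gg ck,
    cc.length = lc.length → gg.length = lg.length →
    (∀ j, i ≤ j → cc[j]? = lc[j]?) → (∀ j, i ≤ j → gg[j]? = lg[j]?) →
    ∃ cc' gg', cluesWhile i cc gg ck =
        some (cc', gg', ck ++ (mcList lc lg i).flatMap (fun _ => ['●', ' '])) ∧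
      (∀ d, d ≠ ' ' → cc'.count d + (mcList lc lg i).count d = cc.count d) ∧
      (∀ d, d ≠ ' ' → gg'.count d + (mcList lc lg i).count d = gg.count d) := by
  intro k
  induction k with
  | zero =>
      intro i hi cc gg ck hlc hlg hcc hgg
      have : i = 4 := by omega
      subst this
      refine ⟨cc, gg, ?_, ?_, ?_⟩
      · unfold cluesWhile
        simp [mcList_four]
      · intro d _; simp [mcList_four]
      · intro d _; simp [mcList_four]
  | succ k ihk =>
      intro i hi cc gg ck hlc hlg hcc hgg
      have hi4 : i < 4 := by omega
      have hic : i < cc.length := by omega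
      have hig : i < gg.length := by omega
      have hcci : cc[i]? = lc[i]? := hcc i le_rfl
      have hggi : gg[i]? = lg[i]? := hgg i le_rfl
      have hgetc : PySem.List.pyGet? cc (i : Int) = some cc[i] := by
        rw [PySem.List.pyGet?_natCast, List.getElem?_eq_getElem hic]
      have hgetg : PySem.List.pyGet? gg (i : Int) = some gg[i] := by
        rw [PySem.List.pyGet?_natCast, List.getElem?_eq_getElem hig]
      unfold cluesWhile
      rw [if_pos hi4, hgetc, hgetg]
      dsimp only
      by_cases heq : cc[i] = gg[i]
      · rw [if_pos heq]
        rw [← heq]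
        set c := cc[i] with hcdef
        have hlci : lc[i]? = some c := by rw [← hcci, List.getElem?_eq_getElem hic]
        have hlgi : lg[i]? = some c := by
          rw [← hggi, List.getElem?_eq_getElem hig, ← heq]
        have hcmem : c ∈ cc := by
          have := hcci.symm ▸ hlci
          exact List.mem_of_getElem? this
        have hgmem : c ∈ gg := by
          have : gg[i]? = some c := by rw [hggi, hlgi]
          exact List.mem_of_getElem? this
        have hmc : mcList lc lg i = c :: mcList lc lg (i + 1) := by
          rw [mcList_step lc lg i hi4, hlci, hlgi, if_pos rfl]
          rfl
        obtain ⟨cc', gg', hrun, hcnt1, hcnt2⟩ :=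
          ihk (i + 1) (by omega) (pyReplace1 cc c ' ') (pyReplace1 gg c ' ')
            (ck ++ ['●', ' '])
            (by rw [length_pyReplace1, hlc]) (by rw [length_pyReplace1, hlg])
            (fun j hj => by
              rw [pyReplace1_getElem?_high cc c ' ' i j (by rw [List.getElem?_eq_getElem hic]) (by omega)]
              exact hcc j (by omega))
            (fun j hj => by
              rw [pyReplace1_getElem?_high gg c ' ' i j (by rw [List.getElem?_eq_getElem hig, ← heq]) (by omega)]
              exact hgg j (by omega))
        refine ⟨cc', gg', ?_, ?_, ?_⟩
        · rw [hrun, hmc]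
          simp
        · intro d hd
          have h1 := hcnt1 d hd
          have h2 := count_pyReplace1 cc c d hcmem hd
          rw [hmc]
          simp only [List.count_cons]
          by_cases hdc : c = d
          · subst hdc
            simp only [if_pos rfl, beq_self_eq_true, if_true] at h2 ⊢
            omega
          · have hb : (c == d) = false := by
              simp only [beq_eq_false_iff_ne, ne_eq]
              exact hdc
            rw [if_neg (fun hh => hdc hh.symm)] at h2
            rw [hb]
            simp only [Bool.false_eq_true, if_false]
            omega
        · intro d hd
          have h1 := hcnt2 d hd
          have h2 := count_pyReplace1 gg c d hgmem hd
          rw [hmc]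
          simp only [List.count_cons]
          by_cases hdc : c = d
          · subst hdc
            simp only [if_pos rfl, beq_self_eq_true, if_true] at h2 ⊢
            omega
          · have hb : (c == d) = false := by
              simp only [beq_eq_false_iff_ne, ne_eq]
              exact hdc
            rw [if_neg (fun hh => hdc hh.symm)] at h2
            rw [hb]
            simp only [Bool.false_eq_true, if_false]
            omega
      · rw [if_neg heq]
        have hmc : mcList lc lg i = mcList lc lg (i + 1) := by
          rw [mcList_step lc lg i hi4]
          have : ¬ lc[i]? = lg[i]? := by
            rw [← hcci, ← hggi, List.getElem?_eq_getElem hic, List.getElem?_eq_getElem hig]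
            simp [heq]
          rw [if_neg this]
          rfl
        obtain ⟨cc', gg', hrun, h1, h2⟩ :=
          ihk (i + 1) (by omega) cc gg ck hlc hlg
            (fun j hj => hcc j (by omega)) (fun j hj => hgg j (by omega))
        exact ⟨cc', gg', by rw [hrun, hmc], fun d hd => hmc ▸ h1 d hd, fun d hd => hmc ▸ h2 d hd⟩

theorem multiset_cons_inter_of_mem {a : Char} {s : Multiset Char} {t : Multiset Char}
    (h : a ∈ t) : (a ::ₘ s) ∩ t = a ::ₘ (s ∩ t.erase a) := by
  ext b
  by_cases hb : b = a
  · subst hb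
    have hpos : 0 < t.count b := Multiset.count_pos.mpr h
    simp only [Multiset.count_inter, Multiset.count_cons, Multiset.count_erase_self,
      eq_self_iff_true, if_true]
    omega
  · simp only [Multiset.count_inter, Multiset.count_cons, Multiset.count_erase_of_ne hb,
      if_neg hb]
    omega

theorem multiset_cons_inter_of_not_mem {a : Char} {s : Multiset Char} {t : Multiset Char}
    (h : a ∉ t) : (a ::ₘ s) ∩ t = s ∩ t := by
  ext b
  by_cases hb : b = a
  · subst hb
    have h0 : t.count b = 0 := Multiset.count_eq_zero.mpr h
    simp only [Multiset.count_inter, Multiset.count_cons, eq_self_iff_true, if_true, h0]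
    omega
  · simp only [Multiset.count_inter, Multiset.count_cons, if_neg hb]
    omega

theorem cluesFor_spec :
    ∀ (xs circle cc gg : List Char),
    (cluesFor xs circle cc gg).1 = circle ++
      (List.replicate
        (Multiset.card ((↑(xs.filter pvNonSp) : Multiset Char) ∩
          ↑(gg.filter pvNonSp))) ['o', ' ']).flatten := by
  intro xs
  induction xs with
  | nil => intro circle cc gg; simp [cluesFor]
  | cons n rest ih =>
      intro circle cc gg
      by_cases hn : n = ' '
      · subst hn
        simp only [cluesFor, if_pos rfl, if_true]
        rw [ih]
        have h1 : pvNonSp ' ' = false := by simp [pvNonSp]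
        rw [List.filter_cons, h1]
        simp only [Bool.false_eq_true, if_false]
      · have hpn : pvNonSp n = true := by simp [pvNonSp, hn]
        have hfil : (n :: rest).filter pvNonSp =
            n :: rest.filter pvNonSp := by rw [List.filter_cons, hpn]; simp
        by_cases hmem : n ∈ gg
        · have hmemY : n ∈ gg.filter pvNonSp := by
            simp [List.mem_filter, hmem, hpn]
          simp only [cluesFor, if_neg hn, if_pos hmem]
          rw [ih]
          rw [hfil]
          have hco : (↑(n :: rest.filter pvNonSp) : Multiset Char) =
              n ::ₘ ↑(rest.filter pvNonSp) := rfl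
          rw [hco, multiset_cons_inter_of_mem (by exact_mod_cast hmemY)]
          rw [filter_pyReplace1 gg n hmem hn]
          rw [Multiset.card_cons]
          have : (↑((gg.filter pvNonSp).erase n) : Multiset Char) =
              (↑(gg.filter pvNonSp) : Multiset Char).erase n := by
            simp
          rw [this]
          rw [List.replicate_succ, List.flatten_cons, List.append_assoc]
        · have hmemY : n ∉ gg.filter pvNonSp := fun h => hmem (List.mem_of_mem_filter h)
          simp only [cluesFor, if_neg hn, if_neg hmem]
          rw [ih, hfil]
          have hco : (↑(n :: rest.filter pvNonSp) : Multiset Char) =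
              n ::ₘ ↑(rest.filter pvNonSp) := rfl
          rw [hco, multiset_cons_inter_of_not_mem (by exact_mod_cast hmemY)]

theorem card_inter_sum (u v : List Char) (S : Finset Char) (hS : ∀ d, d ∈ u → d ∈ S) :
    Multiset.card ((↑u : Multiset Char) ∩ ↑v) = ∑ d ∈ S, min (u.count d) (v.count d) := by
  have hmin : ∀ d : Char, ((↑u : Multiset Char) ∩ ↑v).count d = min (u.count d) (v.count d) := by
    intro d
    rw [Multiset.count_inter, Multiset.coe_count, Multiset.coe_count]
  calc Multiset.card ((↑u : Multiset Char) ∩ ↑v)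
      = ∑ d ∈ ((↑u : Multiset Char) ∩ ↑v).toFinset, ((↑u : Multiset Char) ∩ ↑v).count d :=
        (Multiset.toFinset_sum_count_eq _).symm
    _ = ∑ d ∈ ((↑u : Multiset Char) ∩ ↑v).toFinset, min (u.count d) (v.count d) :=
        Finset.sum_congr rfl (fun d _ => hmin d)
    _ = ∑ d ∈ S, min (u.count d) (v.count d) := by
        apply Finset.sum_subset
        · intro d hd
          rw [Multiset.mem_toFinset, Multiset.mem_inter] at hd
          exact hS d (by exact_mod_cast hd.1)
        · intro d _ hnd
          rw [Multiset.mem_toFinset, Multiset.mem_inter] at hnd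
          by_cases hu : d ∈ u
          · have hv : d ∉ v := fun hv => hnd ⟨by exact_mod_cast hu, by exact_mod_cast hv⟩
            simp [List.count_eq_zero.mpr hv]
          · simp [List.count_eq_zero.mpr hu]

theorem count_filter_nonsp (l : List Char) (d : Char) (hd : d ≠ ' ') :
    (l.filter pvNonSp).count d = l.count d := by
  induction l with
  | nil => rfl
  | cons x xs ih =>
      rw [List.filter_cons]
      by_cases hx : x = ' '
      · subst hx
        have h1 : pvNonSp ' ' = false := by simp [pvNonSp]
        rw [h1]
        simp only [Bool.false_eq_true, if_false, ih]
        rw [List.count_cons]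
        have hb : ((' ' : Char) == d) = false := by
          simp only [beq_eq_false_iff_ne, ne_eq]
          exact fun hh => hd hh.symm
        rw [hb]
        simp
      · have h1 : pvNonSp x = true := by simp [pvNonSp, hx]
        rw [h1]
        simp only [if_true]
        rw [List.count_cons, List.count_cons, ih]

theorem sum_count_eq_length (l : List Char) (S : Finset Char) (hS : ∀ d ∈ l, d ∈ S) :
    ∑ d ∈ S, l.count d = l.length := by
  calc ∑ d ∈ S, l.count d
      = ∑ d ∈ l.toFinset, l.count d := by
        symm
        apply Finset.sum_subset
        · intro d hd
          exact hS d (List.mem_toFinset.mp hd)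
        · intro d _ hnd
          exact List.count_eq_zero.mpr (fun hm => hnd (List.mem_toFinset.mpr hm))
    _ = l.length := by
        have h := Multiset.toFinset_sum_count_eq (↑l : Multiset Char)
        simpa using h

theorem length_filterMap_countP {α β : Type} (f : α → Option β) (l : List α) :
    (l.filterMap f).length = l.countP (fun a => (f a).isSome) := by
  induction l with
  | nil => rfl
  | cons x xs ih =>
      cases hfx : f x <;> simp [List.filterMap_cons, hfx, List.countP_cons, ih]

theorem flatMap_const_beads (l : List Char) :
    l.flatMap (fun _ => ['●', ' ']) = (List.replicate l.length ['●', ' ']).flatten := by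
  induction l with
  | nil => rfl
  | cons x xs ih => simp [List.flatMap_cons, List.replicate_succ, ih]

theorem count_filterMap {α : Type} (f : α → Option Char) (l : List α) (c : Char) :
    (l.filterMap f).count c = l.countP (fun a => f a == some c) := by
  induction l with
  | nil => rfl
  | cons x xs ih =>
      cases hfx : f x with
      | none => simp [List.filterMap_cons, hfx, List.countP_cons, ih]
      | some b =>
          simp only [List.filterMap_cons, hfx, List.countP_cons, List.count_cons, ih]
          by_cases hb : b = c <;> simp [hb]

theorem count_space_filter (l : List Char) : (l.filter pvNonSp).count ' ' = 0 := by
  apply List.count_eq_zero.mpr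
  intro h
  have := (List.mem_filter.mp h).2
  simp [pvNonSp] at this

theorem Clues_spec : Claim_equal_Clues := by
  intro code guess _ hpre
  unfold Pre_Clues at hpre
  obtain ⟨h4c, h4g, hspcond⟩ := hpre
  unfold Spec_Clues Clues Clues_alt
  set lc := code.toList with hlcdef
  set lg := guess.toList with hlgdef
  obtain ⟨cc', gg', hrun, hcnt1, hcnt2⟩ :=
    cluesWhile_spec lc lg h4c h4g 4 0 rfl lc lg [] rfl rfl (fun _ _ => rfl) (fun _ _ => rfl)
  rw [hrun]
  dsimp only
  rw [cluesFor_spec]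
  set mc := mcList lc lg 0 with hmcdef
  set S := lc.toFinset with hSdef
  have hmc_mem : ∀ x ∈ mc, x ∈ lc ∧ x ∈ lg := by
    intro x hx
    rw [hmcdef] at hx
    unfold mcList at hx
    obtain ⟨j, hj, hfj⟩ := List.mem_filterMap.mp hx
    by_cases hcond : lc[j]? = lg[j]?
    · rw [if_pos hcond] at hfj
      exact ⟨List.mem_of_getElem? hfj, List.mem_of_getElem? (hcond ▸ hfj)⟩
    · rw [if_neg hcond] at hfj
      simp at hfj
  have hmc_sp : mc.count ' ' = min (lc.count ' ') (lg.count ' ') := by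
    rw [hmcdef]
    unfold mcList
    rw [count_filterMap, Nat.sub_zero, ← List.range_eq_range']
    rw [← hspcond]
    apply List.countP_congr
    intro j _
    constructor
    · intro hq
      by_cases hcond : lc[j]? = lg[j]?
      · rw [if_pos hcond] at hq
        have h1 : lc[j]? = some ' ' := by simpa using hq
        simp [h1, hcond ▸ h1]
      · rw [if_neg hcond] at hq
        simp at hq
    · intro hq
      rw [decide_eq_true_iff] at hq
      obtain ⟨h1, h2⟩ := hq
      rw [if_pos (h1.trans h2.symm), h1]
      simp
  -- circle count: CA + |mc| = Σ_{d ∈ S} min(count_lc d, count_lg d)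
  have hCA : Multiset.card ((↑(cc'.filter pvNonSp) : Multiset Char) ∩ ↑(gg'.filter pvNonSp))
      + mc.length = ∑ d ∈ S, min (lc.count d) (lg.count d) := by
    have hSsub : ∀ d, d ∈ cc'.filter pvNonSp → d ∈ S := by
      intro d hd
      rw [List.mem_filter] at hd
      have hdne : d ≠ ' ' := (pvNonSp_iff d).mp hd.2
      have hpos : 0 < cc'.count d := List.count_pos_iff.mpr hd.1
      have he := hcnt1 d hdne
      have : 0 < lc.count d := by omega
      exact List.mem_toFinset.mpr (List.count_pos_iff.mp this)
    rw [card_inter_sum _ _ S hSsub]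
    rw [← sum_count_eq_length mc S (fun d hd => List.mem_toFinset.mpr (hmc_mem d hd).1)]
    rw [← Finset.sum_add_distrib]
    apply Finset.sum_congr rfl
    intro d hdS
    by_cases hdne : d = ' '
    · subst hdne
      rw [count_space_filter, count_space_filter, hmc_sp]
      simp
    · rw [count_filter_nonsp _ _ hdne, count_filter_nonsp _ _ hdne]
      have e1 := hcnt1 d hdne
      have e2 := hcnt2 d hdne
      omega
  -- B's exact equals |mc|
  have hex : ((PySem.List.pyRange 0 4 1).countP (fun i =>
      (PySem.List.pyGet? lc i).isSome &&
        (PySem.List.pyGet? lc i == PySem.List.pyGet? lg i))) = mc.length := by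
    rw [hmcdef]
    unfold mcList
    rw [length_filterMap_countP, Nat.sub_zero, ← List.range_eq_range']
    rw [PySem.List.pyRange_one, List.countP_map]
    have h44 : ((4 : Int) - 0).toNat = 4 := by decide
    rw [h44]
    apply List.countP_congr
    intro j hj
    have hj4 : j < 4 := List.mem_range.mp hj
    have hjc : j < lc.length := by omega
    have hjg : j < lg.length := by omega
    simp only [Function.comp_apply, zero_add, PySem.List.pyGet?_natCast,
      List.getElem?_eq_getElem hjc, List.getElem?_eq_getElem hjg]
    by_cases hq : lc[j] = lg[j]
    · simp [hq]
    · simp [hq]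
  -- B's common equals the same Finset sum
  have hcommon : ((PySem.Set.ofList lc).map (fun c => min (lc.count c) (lg.count c))).sum
      = ∑ d ∈ S, min (lc.count d) (lg.count d) := by
    rw [← List.sum_toFinset _ (PySem.Set.nodup_ofList (xs := lc))]
    apply Finset.sum_congr _ (fun d _ => rfl)
    rw [hSdef]
    ext d
    rw [List.mem_toFinset, List.mem_toFinset]
    exact PySem.Set.mem_ofList lc d
  rw [hex, hcommon]
  rw [flatMap_const_beads]
  have hlen : ∑ d ∈ S, min (lc.count d) (lg.count d) - mc.length =
      Multiset.card ((↑(cc'.filter pvNonSp) : Multiset Char) ∩ ↑(gg'.filter pvNonSp)) := by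
    omega
  rw [hlen]
  simp
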